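-- pv_equiv track=rewrite | github.com/akshat123436/DSA_questions | test.py | determineWinner
-- ===== SOURCE A (Python) =====
-- def determineWinner(markers):
--     james_points = 0
--     bob_points = 0
--
--     while len(markers) > 0:
--         if len(markers) == 1:
--             james_points += markers[0]
--             break
--
--         if markers[0] >= markers[-1]:
--             james_points += markers[0]
--             markers = markers[1:-1]
--         else:
--             bob_points += markers[-1]
--             markers = markers[0:-1]
--
--     return james_points
-- ===== SOURCE B (Python) =====
-- def determineWinner(markers):
--     james_points = 0
--     i, j = 0, len(markers) - 1
--     while i < j:
--         if markers[i] >= markers[j]: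
--             james_points += markers[i]
--             i += 1
--             j -= 1
--         else:
--             j -= 1
--     if i == j:
--         james_points += markers[i]
--     return james_points
-- ===== Notes on version B (the rewrite author's own statement) =====
-- stated objective: faster
-- what changed: Replaces the slice-rebuilding while loop (each step copies the remaining list) with an O(n) two-pointer scan over the original list that never copies.
import Mathlib
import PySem

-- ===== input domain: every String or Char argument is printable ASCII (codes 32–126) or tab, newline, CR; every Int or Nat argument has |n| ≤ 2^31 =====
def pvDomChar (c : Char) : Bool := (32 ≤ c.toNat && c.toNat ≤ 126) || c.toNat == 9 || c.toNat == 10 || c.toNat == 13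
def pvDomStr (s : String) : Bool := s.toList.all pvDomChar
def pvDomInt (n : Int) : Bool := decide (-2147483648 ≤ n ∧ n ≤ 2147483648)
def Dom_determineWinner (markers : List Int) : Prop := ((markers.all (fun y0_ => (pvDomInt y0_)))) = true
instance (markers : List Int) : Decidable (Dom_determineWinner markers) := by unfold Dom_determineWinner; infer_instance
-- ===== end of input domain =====

-- B replaces A's slice-rebuilding while loop by a two-pointer scan over the fixed list (objective: faster).

-- ===== PORT A =====
-- markers[1:-1] is tail-then-dropLast; the port's termination proof cites this, so it stays above the port.
theorem pvSlice_one_neg_one (xs : List Int) :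
    PySem.List.slice xs (some 1) (some (-1)) = xs.tail.dropLast := by
  rcases xs with _ | ⟨a, t⟩
  · rfl
  · simp [PySem.List.slice, PySem.List.clampIdx, List.dropLast_eq_take]
    rw [if_neg (by omega)]
    omega

def pvLoopA (markers : List Int) (james bob : Int) : Int :=
  if markers.length = 0 then james
  else if markers.length = 1 then james + PySem.List.pyGetD markers 0 0
  else if PySem.List.pyGetD markers 0 0 ≥ PySem.List.pyGetD markers (-1) 0 then
    pvLoopA (PySem.List.slice markers (some 1) (some (-1)))
      (james + PySem.List.pyGetD markers 0 0) bob
  else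
    pvLoopA (PySem.List.slice markers (some 0) (some (-1)))
      james (bob + PySem.List.pyGetD markers (-1) 0)
termination_by markers.length
decreasing_by
  · rw [pvSlice_one_neg_one]; simp; omega
  · simp [PySem.List.slice_to_neg_one]; omega

def determineWinner (markers : List Int) : Int := pvLoopA markers 0 0

-- ===== PORT B =====
def pvLoopB (m : List Int) (i j james : Int) : Int :=
  if i < j then
    if PySem.List.pyGetD m i 0 ≥ PySem.List.pyGetD m j 0 then
      pvLoopB m (i + 1) (j - 1) (james + PySem.List.pyGetD m i 0)
    else
      pvLoopB m i (j - 1) james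
  else if i = j then james + PySem.List.pyGetD m i 0
  else james
termination_by (j - i).toNat
decreasing_by all_goals omega

def determineWinner_alt (markers : List Int) : Int :=
  pvLoopB markers 0 ((markers.length : Int) - 1) 0

-- ===== PRECONDITION & SPEC =====
def Spec_determineWinner (markers : List Int) (out : Int) : Prop := out = determineWinner_alt markers
instance (markers : List Int) (out : Int) : Decidable (Spec_determineWinner markers out) := by unfold Spec_determineWinner; infer_instance

-- ===== CLAIM (what is proved, stated in full; the proofs are below) =====
def Claim_equal_determineWinner : Prop := ∀ (markers : List Int), Dom_determineWinner markers → Spec_determineWinner markers (determineWinner markers)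

-- ===== LEMMAS AND PROOFS =====

theorem pvSlice_zero_neg_one (xs : List Int) :
    PySem.List.slice xs (some 0) (some (-1)) = xs.dropLast := by
  simp [PySem.List.slice_to_neg_one]

theorem pvGetNat (m : List Int) (i : Nat) (hi : i < m.length) :
    PySem.List.pyGetD m ((i : Nat) : Int) 0 = m[i] := by
  have := PySem.List.pyGetD_eq_getElem (xs := m) (i := ((i : Nat) : Int)) (d := 0)
    (by omega) (by exact_mod_cast hi)
  simpa using this

-- Loop invariant: A's loop on the contiguous sublist m[i : i+n] computes B's loop on pointers (i, i+n-1).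
theorem pvKey (m : List Int) :
    ∀ n i james bob, i + n ≤ m.length →
      pvLoopA ((m.drop i).take n) james bob
        = pvLoopB m (i : Int) ((i : Int) + (n : Int) - 1) james := by
  intro n
  induction n using Nat.strong_induction_on with
  | _ n ih =>
  intro i james bob h
  match n with
  | 0 =>
    rw [pvLoopA, pvLoopB]
    simp
    rw [if_neg (by omega), if_neg (by omega)]
  | 1 =>
    have hi : i < m.length := by omega
    have hl : (m.drop i).take 1 = [m[i]] := by
      rw [List.drop_eq_getElem_cons hi]; rfl
    have e : (i:Int) + ((1:Nat):Int) - 1 = (i:Int) := by push_cast; ring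
    rw [pvLoopA, pvLoopB, hl, e]
    rw [if_neg (by simp), if_pos (by simp), if_neg (lt_irrefl _), if_pos rfl,
      PySem.List.pyGetD_zero_cons, pvGetNat m i hi]
  | (k+2) =>
    have hi : i < m.length := by omega
    have hj : i + (k+1) < m.length := by omega
    have hdrop : m.drop i = m[i] :: m.drop (i+1) := List.drop_eq_getElem_cons hi
    have hl : (m.drop i).take (k+2) = m[i] :: (m.drop (i+1)).take (k+1) := by
      rw [hdrop]; rfl
    have hlen : ((m.drop i).take (k+2)).length = k+2 := by simp; omega
    have hlen1 : ((m.drop (i+1)).take (k+1)).length = k+1 := by simp; omega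
    have hsplit : (m.drop i).take (k+2) = (m.drop i).take (k+1) ++ [m[i+(k+1)]] := by
      rw [List.take_add_one, List.getElem?_drop, List.getElem?_eq_getElem hj]
      rfl
    have hlast : PySem.List.pyGetD ((m.drop i).take (k+2)) (-1) 0 = m[i + (k+1)] := by
      rw [hsplit, PySem.List.pyGetD_neg_one_append_singleton]
    have hhead : PySem.List.pyGetD ((m.drop i).take (k+2)) 0 0 = m[i] := by
      rw [hl, PySem.List.pyGetD_zero_cons]
    have hBi := pvGetNat m i hi
    have hBj := pvGetNat m (i+(k+1)) hj
    have htail : ((m.drop i).take (k+2)).tail.dropLast = (m.drop (i+1)).take k := by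
      rw [hl]
      simp [List.dropLast_eq_take, hlen1, List.take_take]
    have hdl : ((m.drop i).take (k+2)).dropLast = (m.drop i).take (k+1) := by
      rw [List.dropLast_eq_take, hlen]
      simp [List.take_take]
    have e2 : (i:Int) + ((k+2:Nat):Int) - 1 = ((i+(k+1) : Nat) : Int) := by push_cast; ring
    rw [pvLoopA, if_neg (by simp [hlen]), if_neg (by simp [hlen]), hhead, hlast]
    by_cases hc : m[i] ≥ m[i + (k+1)]
    · rw [if_pos hc, pvSlice_one_neg_one, pvLoopB, e2, if_pos (by push_cast; omega),
        hBi, hBj, if_pos hc, htail,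
        ih k (by omega) (i+1) (james + m[i]) bob (by omega)]
      congr 1; push_cast; ring
    · rw [if_neg hc, pvSlice_zero_neg_one, pvLoopB, e2, if_pos (by push_cast; omega),
        hBi, hBj, if_neg hc, hdl,
        ih (k+1) (by omega) i james (bob + m[i + (k+1)]) (by omega)]
      congr 1

-- ===== VERDICT (by name: the statement is the Claim_ definition above) =====
theorem determineWinner_spec : Claim_equal_determineWinner := by
  intro markers _
  unfold Spec_determineWinner determineWinner determineWinner_alt
  have h := pvKey markers markers.length 0 0 0 (by omega)
  simpa using h
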